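-- pv_equiv track=rewrite | github.com/Adya6714/retrieval-vs-computation | scripts/maintenance/translate_w3_answers.py | translate_action
-- ===== SOURCE A (Python) =====
-- def translate_action(pddl_action: str, mapping: dict[str, str]) -> str:
--     parts = pddl_action.lower().split()
--     if not parts:
--         return pddl_action
--
--     verb = parts[0]
--     args = parts[1:]
--
--     # Map the arguments to names, default to the argument if not found
--     names = [mapping.get(arg, arg) for arg in args]
--
--     if verb == "pick-up" and len(names) == 1:
--         return f"select {names[0]}"
--     elif verb == "put-down" and len(names) == 1:
--         return f"release {names[0]}"
--     elif verb == "stack" and len(names) == 2: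
--         return f"place {names[0]} under {names[1]}"
--     elif verb == "unstack" and len(names) == 2:
--         return f"remove {names[0]} from {names[1]}"
--
--     return pddl_action
-- ===== SOURCE B (Python) =====
-- _TABLE = {
--     "pick-up": (1, ("select ", "")),
--     "put-down": (1, ("release ", "")),
--     "stack": (2, ("place ", " under ", "")),
--     "unstack": (2, ("remove ", " from ", "")),
-- }
--
--
-- def translate_action(pddl_action: str, mapping: dict[str, str]) -> str:
--     parts = pddl_action.lower().split()
--     if not parts:
--         return pddl_action
--     verb, args = parts[0], parts[1:]
--     entry = _TABLE.get(verb)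
--     if entry is None or entry[0] != len(args):
--         return pddl_action
--     pieces = entry[1]
--     out = pieces[0]
--     for name, piece in zip((mapping.get(a, a) for a in args), pieces[1:]):
--         out += name + piece
--     return out
-- ===== Notes on version B (the rewrite author's own statement) =====
-- stated objective: idiomatic
-- what changed: Replaces the four-branch if/elif chain of f-strings by a single data-driven dispatch table mapping each verb to (arity, template pieces), rendered by interleaving argument names with the stored pieces.
import Mathlib
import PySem

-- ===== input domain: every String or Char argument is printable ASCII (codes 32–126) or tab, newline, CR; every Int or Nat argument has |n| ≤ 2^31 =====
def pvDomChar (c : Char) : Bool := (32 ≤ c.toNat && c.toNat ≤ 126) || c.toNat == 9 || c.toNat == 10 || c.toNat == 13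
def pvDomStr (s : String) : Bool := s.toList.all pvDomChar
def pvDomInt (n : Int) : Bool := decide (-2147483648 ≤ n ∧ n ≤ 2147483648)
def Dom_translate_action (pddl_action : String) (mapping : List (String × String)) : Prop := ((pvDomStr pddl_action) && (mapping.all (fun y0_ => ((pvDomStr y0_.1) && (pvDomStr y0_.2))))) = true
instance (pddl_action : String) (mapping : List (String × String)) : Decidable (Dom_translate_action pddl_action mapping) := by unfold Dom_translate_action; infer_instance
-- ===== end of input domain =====

-- B replaces A's four-branch if/elif chain by a single verb ↦ (arity, template-pieces) dispatch table (idiomatic, same cost).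
-- ===== PORT A =====
def translate_action (pddl_action : String) (mapping : List (String × String)) : String :=
  let parts := PySem.Str.split₀ (PySem.Str.lower pddl_action)
  match parts with
  | [] => pddl_action
  | verb :: args =>
    let names := args.map (fun arg => (PySem.Dict.mk mapping).getD arg arg)
    if verb = "pick-up" ∧ names.length = 1 then
      "select " ++ PySem.List.pyGetD names 0 ""
    else if verb = "put-down" ∧ names.length = 1 then
      "release " ++ PySem.List.pyGetD names 0 ""
    else if verb = "stack" ∧ names.length = 2 then
      "place " ++ PySem.List.pyGetD names 0 "" ++ " under " ++ PySem.List.pyGetD names 1 ""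
    else if verb = "unstack" ∧ names.length = 2 then
      "remove " ++ PySem.List.pyGetD names 0 "" ++ " from " ++ PySem.List.pyGetD names 1 ""
    else
      pddl_action

-- ===== PORT B =====
-- B's dispatch table: verb ↦ (required arity, template pieces)
def pvTable : List (String × (Nat × List String)) :=
  [("pick-up", (1, ["select ", ""])),
   ("put-down", (1, ["release ", ""])),
   ("stack", (2, ["place ", " under ", ""])),
   ("unstack", (2, ["remove ", " from ", ""]))]

def translate_action_alt (pddl_action : String) (mapping : List (String × String)) : String :=
  let parts := PySem.Str.split₀ (PySem.Str.lower pddl_action)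
  match parts with
  | [] => pddl_action
  | verb :: args =>
    match (PySem.Dict.mk pvTable).get? verb with
    | none => pddl_action
    | some (arity, pieces) =>
      if arity ≠ args.length then pddl_action
      else
        ((args.map (fun a => (PySem.Dict.mk mapping).getD a a)).zip pieces.tail).foldl
          (fun out np => out ++ np.1 ++ np.2) (pieces.headD "")

-- ===== PRECONDITION & SPEC =====
def Spec_translate_action (pddl_action : String) (mapping : List (String × String)) (out : String) : Prop := out = translate_action_alt pddl_action mapping
instance (pddl_action : String) (mapping : List (String × String)) (out : String) : Decidable (Spec_translate_action pddl_action mapping out) := by unfold Spec_translate_action; infer_instance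

-- ===== CLAIM (what is proved, stated in full; the proofs are below) =====
def Claim_equal_translate_action : Prop := ∀ (pddl_action : String) (mapping : List (String × String)), Dom_translate_action pddl_action mapping → Spec_translate_action pddl_action mapping (translate_action pddl_action mapping)

-- ===== LEMMAS AND PROOFS =====

-- ===== VERDICT (by name: the statement is the Claim_ definition above) =====
-- A's if/elif chain equals B's table dispatch, for any verb and any name list.
lemma core_eq (verb s : String) (names : List String) :
    (if verb = "pick-up" ∧ names.length = 1 then
      "select " ++ PySem.List.pyGetD names 0 ""
    else if verb = "put-down" ∧ names.length = 1 then
      "release " ++ PySem.List.pyGetD names 0 ""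
    else if verb = "stack" ∧ names.length = 2 then
      "place " ++ PySem.List.pyGetD names 0 "" ++ " under " ++ PySem.List.pyGetD names 1 ""
    else if verb = "unstack" ∧ names.length = 2 then
      "remove " ++ PySem.List.pyGetD names 0 "" ++ " from " ++ PySem.List.pyGetD names 1 ""
    else s)
    = (match (PySem.Dict.mk pvTable).get? verb with
       | none => s
       | some (arity, pieces) =>
         if arity ≠ names.length then s
         else (names.zip pieces.tail).foldl (fun out np => out ++ np.1 ++ np.2) (pieces.headD "")) := by
  by_cases h1 : verb = "pick-up"
  · subst h1
    rcases names with _ | ⟨a, _ | ⟨b, _ | ⟨c, t⟩⟩⟩ <;>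
      simp [pvTable, PySem.Dict.get?_mk_cons, PySem.List.pyGetD, PySem.List.pyGet?, PySem.List.pyIdx?]
  by_cases h2 : verb = "put-down"
  · subst h2
    rcases names with _ | ⟨a, _ | ⟨b, _ | ⟨c, t⟩⟩⟩ <;>
      simp [pvTable, PySem.Dict.get?_mk_cons, PySem.List.pyGetD, PySem.List.pyGet?, PySem.List.pyIdx?]
  by_cases h3 : verb = "stack"
  · subst h3
    rcases names with _ | ⟨a, _ | ⟨b, _ | ⟨c, t⟩⟩⟩ <;>
      simp [pvTable, PySem.Dict.get?_mk_cons, PySem.List.pyGetD, PySem.List.pyGet?,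
        PySem.List.pyIdx?, String.append_assoc]
  by_cases h4 : verb = "unstack"
  · subst h4
    rcases names with _ | ⟨a, _ | ⟨b, _ | ⟨c, t⟩⟩⟩ <;>
      simp [pvTable, PySem.Dict.get?_mk_cons, PySem.List.pyGetD, PySem.List.pyGet?,
        PySem.List.pyIdx?, String.append_assoc]
  · simp [pvTable, PySem.Dict.get?_mk_cons, PySem.Dict.get?, h1, h2, h3, h4,
      Ne.symm h1, Ne.symm h2, Ne.symm h3, Ne.symm h4]

theorem translate_action_spec : Claim_equal_translate_action := by
  intro pddl_action mapping _
  unfold Spec_translate_action translate_action translate_action_alt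
  cases h : PySem.Str.split₀ (PySem.Str.lower pddl_action) with
  | nil => rfl
  | cons verb args =>
      simpa using core_eq verb pddl_action (args.map (fun a => (PySem.Dict.mk mapping).getD a a))
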